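-- pv_equiv track=rewrite | github.com/SmritiVM/Advent-Of-Code-2024 | 09.Disk_Fragmenter/disk_fragmenter.py | find_contiguous_blank_blocks
-- ===== SOURCE A (Python) =====
-- def find_end_index(disk, disk_length, index, offset):
--     end_index = index
--     while 0 <= end_index < disk_length and disk[end_index] == disk[index]:
--         end_index += offset
--     return end_index
--
-- def find_contiguous_blank_blocks(disk, disk_length):
--     blanks = []
--     blank_start = 0
--     while True:
--         while blank_start < disk_length and disk[blank_start] != '.':
--             blank_start += 1
--         if blank_start >= disk_length: break
--         blank_end = find_end_index(disk, disk_length, blank_start, 1)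
--         blanks.append((blank_start, blank_end))
--         blank_start = blank_end
--     return blanks
-- ===== SOURCE B (Python) =====
-- def find_contiguous_blank_blocks(disk, disk_length):
--     blanks = []
--     run_start = None
--     for i in range(disk_length):
--         if disk[i] == '.':
--             if run_start is None:
--                 run_start = i
--         elif run_start is not None:
--             blanks.append((run_start, i))
--             run_start = None
--     if run_start is not None:
--         blanks.append((run_start, disk_length))
--     return blanks
-- ===== Notes on version B (the rewrite author's own statement) =====
-- stated objective: simpler
-- what changed: Replaces the nested while-loops plus the find_end_index helper with a single for-loop state machine over range(disk_length) that tracks the current run start and flushes the final run after the loop.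
import Mathlib
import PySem

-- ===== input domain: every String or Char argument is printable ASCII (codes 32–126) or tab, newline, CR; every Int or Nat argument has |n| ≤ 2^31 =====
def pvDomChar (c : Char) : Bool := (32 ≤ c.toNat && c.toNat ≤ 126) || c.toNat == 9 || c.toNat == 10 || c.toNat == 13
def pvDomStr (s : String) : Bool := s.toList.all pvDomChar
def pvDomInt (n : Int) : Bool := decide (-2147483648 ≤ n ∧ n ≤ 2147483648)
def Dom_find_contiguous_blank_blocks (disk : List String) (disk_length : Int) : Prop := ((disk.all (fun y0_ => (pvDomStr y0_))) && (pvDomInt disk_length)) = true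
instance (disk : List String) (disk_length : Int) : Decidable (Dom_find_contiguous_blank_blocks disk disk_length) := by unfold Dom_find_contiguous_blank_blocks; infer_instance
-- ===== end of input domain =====

-- B replaces A's nested while-loops + find_end_index helper by a single linear pass
-- with a run-start state variable (objective: simpler; same O(n) cost).

-- ===== PORT A =====
-- inner `while blank_start < disk_length and disk[blank_start] != '.'` loop of A
def pvSkip (disk : List String) (dl : Int) (bs : Int) : Int :=
  if h : bs < dl ∧ ((PySem.List.pyGet? disk bs).getD "") ≠ "." then pvSkip disk dl (bs + 1) else bs
termination_by (dl - bs).toNat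
decreasing_by omega

-- the `while 0 <= end_index < disk_length and disk[end_index] == disk[index]` loop of
-- find_end_index, fueled (A only calls it with offset = 1, for which the fuel below suffices)
def pvFindEndLoop (disk : List String) (dl : Int) (index : Int) (offset : Int) (e : Int) : Nat → Int
  | 0 => e
  | fuel + 1 =>
    if 0 ≤ e ∧ e < dl ∧ (PySem.List.pyGet? disk e).getD "" = (PySem.List.pyGet? disk index).getD "" then
      pvFindEndLoop disk dl index offset (e + offset) fuel
    else e

def find_end_index (disk : List String) (dl : Int) (index : Int) (offset : Int) : Int :=
  pvFindEndLoop disk dl index offset index (dl.toNat + 1)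

-- A's outer `while True` loop, fueled (dl.toNat + 1 iterations suffice: blank_start
-- strictly increases each round starting from 0)
def pvOuterLoop (disk : List String) (dl : Int) (bs : Int) (blanks : List (Int × Int)) : Nat → List (Int × Int)
  | 0 => blanks
  | fuel + 1 =>
    let bs' := pvSkip disk dl bs
    if dl ≤ bs' then blanks
    else
      let be := find_end_index disk dl bs' 1
      pvOuterLoop disk dl be (blanks ++ [(bs', be)]) fuel

def find_contiguous_blank_blocks (disk : List String) (disk_length : Int) : List (Int × Int) :=
  pvOuterLoop disk disk_length 0 [] (disk_length.toNat + 1)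

-- ===== PORT B =====
-- loop body of B's single pass: state = (blanks so far, run_start : Option Int)
def pvAltStep (disk : List String) (st : List (Int × Int) × Option Int) (i : Int) : List (Int × Int) × Option Int :=
  if (PySem.List.pyGet? disk i).getD "" = "." then
    match st.2 with
    | none => (st.1, some i)
    | some _ => st
  else
    match st.2 with
    | some rs => (st.1 ++ [(rs, i)], none)
    | none => st

def find_contiguous_blank_blocks_alt (disk : List String) (disk_length : Int) : List (Int × Int) :=
  let st := (PySem.List.pyRange 0 disk_length 1).foldl (pvAltStep disk) ([], none)
  match st.2 with
  | some rs => st.1 ++ [(rs, disk_length)]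
  | none => st.1

-- ===== PRECONDITION & SPEC =====
-- Pre_ excludes exactly the inputs where Python A raises IndexError: when
-- disk_length > len(disk), A's scan always reaches disk[len(disk)].
def Pre_find_contiguous_blank_blocks (disk : List String) (disk_length : Int) : Prop :=
  disk_length ≤ (disk.length : Int)
instance (disk : List String) (disk_length : Int) : Decidable (Pre_find_contiguous_blank_blocks disk disk_length) := by unfold Pre_find_contiguous_blank_blocks; infer_instance

def pvWitness_find_contiguous_blank_blocks : List String × Int := (["1", ".", ".", "2", "."], 5)

def Spec_find_contiguous_blank_blocks (disk : List String) (disk_length : Int) (out : List (Int × Int)) : Prop := out = find_contiguous_blank_blocks_alt disk disk_length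
instance (disk : List String) (disk_length : Int) (out : List (Int × Int)) : Decidable (Spec_find_contiguous_blank_blocks disk disk_length out) := by unfold Spec_find_contiguous_blank_blocks; infer_instance

-- ===== CLAIM (what is proved, stated in full; the proofs are below) =====
def Claim_equal_find_contiguous_blank_blocks : Prop := ∀ (disk : List String) (disk_length : Int), Dom_find_contiguous_blank_blocks disk disk_length → Pre_find_contiguous_blank_blocks disk disk_length → Spec_find_contiguous_blank_blocks disk disk_length (find_contiguous_blank_blocks disk disk_length)

-- ===== LEMMAS AND PROOFS =====

-- B's "fold the rest of the range from j, then flush", as a function of the state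
def pvF (disk : List String) (dl : Int) (st : List (Int × Int) × Option Int) (j : Int) : List (Int × Int) :=
  let st' := (PySem.List.pyRange j dl 1).foldl (pvAltStep disk) st
  match st'.2 with
  | some rs => st'.1 ++ [(rs, dl)]
  | none => st'.1

lemma pvStep_dot_none (disk : List String) (j : Int) (acc : List (Int × Int))
    (hg : (PySem.List.pyGet? disk j).getD "" = ".") :
    pvAltStep disk (acc, none) j = (acc, some j) := by simp [pvAltStep, hg]

lemma pvStep_dot_some (disk : List String) (j rs : Int) (acc : List (Int × Int))
    (hg : (PySem.List.pyGet? disk j).getD "" = ".") :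
    pvAltStep disk (acc, some rs) j = (acc, some rs) := by simp [pvAltStep, hg]

lemma pvStep_nodot_none (disk : List String) (j : Int) (acc : List (Int × Int))
    (hg : ¬ (PySem.List.pyGet? disk j).getD "" = ".") :
    pvAltStep disk (acc, none) j = (acc, none) := by simp [pvAltStep, hg]

lemma pvStep_nodot_some (disk : List String) (j rs : Int) (acc : List (Int × Int))
    (hg : ¬ (PySem.List.pyGet? disk j).getD "" = ".") :
    pvAltStep disk (acc, some rs) j = (acc ++ [(rs, j)], none) := by simp [pvAltStep, hg]

lemma pvF_acc (disk : List String) (dl : Int) :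
    ∀ (n : Nat) (j : Int), (dl - j).toNat ≤ n →
    ∀ (acc : List (Int × Int)) (r : Option Int),
      pvF disk dl (acc, r) j = acc ++ pvF disk dl ([], r) j := by
  intro n
  induction n with
  | zero =>
    intro j hj acc r
    rw [pvF, pvF, PySem.List.pyRange_one_eq_nil (by omega)]
    cases r <;> simp
  | succ n ih =>
    intro j hj acc r
    by_cases hjd : j < dl
    · have h1 : ∀ (a : List (Int × Int)) (r' : Option Int),
          pvF disk dl (a, r') (j + 1) = a ++ pvF disk dl ([], r') (j + 1) :=
        fun a r' => ih (j + 1) (by omega) a r'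
      simp only [pvF] at h1
      simp only [pvF, PySem.List.pyRange_one_cons hjd, List.foldl_cons]
      by_cases hg : (PySem.List.pyGet? disk j).getD "" = "."
      · cases r with
        | none =>
          rw [pvStep_dot_none disk j acc hg, pvStep_dot_none disk j [] hg]
          exact h1 acc (some j)
        | some rs =>
          rw [pvStep_dot_some disk j rs acc hg, pvStep_dot_some disk j rs [] hg]
          exact h1 acc (some rs)
      · cases r with
        | none =>
          rw [pvStep_nodot_none disk j acc hg, pvStep_nodot_none disk j [] hg]
          exact h1 acc none
        | some rs =>
          rw [pvStep_nodot_some disk j rs acc hg, pvStep_nodot_some disk j rs [] hg,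
            List.nil_append, h1 (acc ++ [(rs, j)]) none, h1 [(rs, j)] none,
            List.append_assoc]
    · rw [pvF, pvF, PySem.List.pyRange_one_eq_nil (by omega)]
      cases r <;> simp

lemma pvFindEndLoop_ge (disk : List String) (dl idx : Int) :
    ∀ (n : Nat) (j : Int), j ≤ pvFindEndLoop disk dl idx 1 j n := by
  intro n
  induction n with
  | zero => intro j; simp [pvFindEndLoop]
  | succ n ih =>
    intro j
    simp only [pvFindEndLoop]
    split
    · exact le_trans (by omega) (ih (j + 1))
    · exact le_rfl

lemma pvRun (disk : List String) (dl idx : Int)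
    (hidx : (PySem.List.pyGet? disk idx).getD "" = ".") :
    ∀ (n : Nat) (j : Int), 0 ≤ j → j ≤ dl → (dl - j).toNat < n →
    ∀ (rs : Int),
      pvF disk dl ([], some rs) j =
        (rs, pvFindEndLoop disk dl idx 1 j n) ::
          pvF disk dl ([], none) (pvFindEndLoop disk dl idx 1 j n) := by
  intro n
  induction n with
  | zero => intro j _ _ h; omega
  | succ n ih =>
    intro j hj0 hjd hfuel rs
    by_cases hjlt : j < dl
    · by_cases hg : (PySem.List.pyGet? disk j).getD "" = "."
      · have hfe : pvFindEndLoop disk dl idx 1 j (n + 1) =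
            pvFindEndLoop disk dl idx 1 (j + 1) n := by
          simp only [pvFindEndLoop]
          rw [if_pos ⟨hj0, hjlt, hg.trans hidx.symm⟩]
        have hstep : pvF disk dl ([], some rs) j = pvF disk dl ([], some rs) (j + 1) := by
          rw [pvF, PySem.List.pyRange_one_cons hjlt]
          simp only [List.foldl_cons, pvStep_dot_some disk j rs [] hg]
          rw [pvF]
        rw [hfe, hstep]
        exact ih (j + 1) (by omega) (by omega) (by omega) rs
      · have hfe : pvFindEndLoop disk dl idx 1 j (n + 1) = j := by
          simp only [pvFindEndLoop]
          rw [if_neg]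
          intro h
          exact hg (h.2.2.trans hidx)
        have hnone : pvF disk dl ([], none) j = pvF disk dl ([], none) (j + 1) := by
          rw [pvF, PySem.List.pyRange_one_cons hjlt]
          simp only [List.foldl_cons, pvStep_nodot_none disk j [] hg]
          rw [pvF]
        have hlhs : pvF disk dl ([], some rs) j = (rs, j) :: pvF disk dl ([], none) (j + 1) := by
          rw [pvF, PySem.List.pyRange_one_cons hjlt]
          simp only [List.foldl_cons, pvStep_nodot_some disk j rs [] hg, List.nil_append]
          have h2 := pvF_acc disk dl n (j + 1) (by omega) [(rs, j)] none
          simp only [pvF] at h2 ⊢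
          rw [h2]
          rfl
        rw [hfe, hlhs, hnone]
    · have hjeq : j = dl := by omega
      have hfe : pvFindEndLoop disk dl idx 1 j (n + 1) = j := by
        simp only [pvFindEndLoop]
        rw [if_neg]
        intro h
        omega
      rw [hfe]
      rw [pvF, pvF, PySem.List.pyRange_one_eq_nil (by omega)]
      subst hjeq
      simp

lemma pvMain (disk : List String) (dl : Int) :
    ∀ (k : Nat) (bs : Int), (dl - bs).toNat = k → 0 ≤ bs →
    ∀ (n : Nat) (acc : List (Int × Int)), (dl - bs).toNat < n →
      pvOuterLoop disk dl bs acc n = acc ++ pvF disk dl ([], none) bs := by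
  intro k
  induction k using Nat.strong_induction_on with
  | _ k ih =>
    intro bs hk hbs n acc hn
    obtain ⟨n, rfl⟩ : ∃ m, n = m + 1 := ⟨n - 1, by omega⟩
    by_cases hlt : bs < dl
    · by_cases hg : (PySem.List.pyGet? disk bs).getD "" = "."
      · have hskip : pvSkip disk dl bs = bs := by
          rw [pvSkip, dif_neg (by simp [hg])]
        have hfe : find_end_index disk dl bs 1 =
            pvFindEndLoop disk dl bs 1 (bs + 1) dl.toNat := by
          rw [find_end_index]
          simp only [pvFindEndLoop]
          rw [if_pos ⟨hbs, hlt, trivial⟩]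
        set be := pvFindEndLoop disk dl bs 1 (bs + 1) dl.toNat with hbe
        have hge : bs + 1 ≤ be := pvFindEndLoop_ge disk dl bs dl.toNat (bs + 1)
        have hrun := pvRun disk dl bs hg dl.toNat (bs + 1) (by omega) (by omega) (by omega) bs
        have hB : pvF disk dl ([], none) bs = pvF disk dl ([], some bs) (bs + 1) := by
          rw [pvF, PySem.List.pyRange_one_cons hlt]
          simp only [List.foldl_cons, pvStep_dot_none disk bs [] hg]
          rw [pvF]
        simp only [pvOuterLoop, hskip]
        rw [if_neg (by omega), hfe]
        rw [← hbe] at hrun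
        have hih := ih (dl - be).toNat (by omega) be rfl (by omega) n (acc ++ [(bs, be)]) (by omega)
        rw [hih, hB, hrun]
        simp
      · have hout : pvOuterLoop disk dl bs acc (n + 1) = pvOuterLoop disk dl (bs + 1) acc (n + 1) := by
          have hskip : pvSkip disk dl bs = pvSkip disk dl (bs + 1) := by
            rw [pvSkip, dif_pos ⟨hlt, hg⟩]
          simp only [pvOuterLoop, hskip]
        have hB : pvF disk dl ([], none) bs = pvF disk dl ([], none) (bs + 1) := by
          rw [pvF, PySem.List.pyRange_one_cons hlt]
          simp only [List.foldl_cons, pvStep_nodot_none disk bs [] hg]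
          rw [pvF]
        rw [hout, ih (dl - (bs + 1)).toNat (by omega) (bs + 1) rfl (by omega) (n + 1) acc (by omega), hB]
    · have hskip : pvSkip disk dl bs = bs := by
        rw [pvSkip, dif_neg (by simp [hlt])]
      simp only [pvOuterLoop, hskip]
      rw [if_pos (by omega), pvF, PySem.List.pyRange_one_eq_nil (by omega)]
      simp

-- ===== VERDICT (by name: the statement is the Claim_ definition above) =====
theorem find_contiguous_blank_blocks_spec : Claim_equal_find_contiguous_blank_blocks := by
  intro disk dl _ _
  unfold Spec_find_contiguous_blank_blocks
  have h := pvMain disk dl (dl - 0).toNat 0 rfl le_rfl (dl.toNat + 1) [] (by omega)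
  simpa [find_contiguous_blank_blocks, find_contiguous_blank_blocks_alt, pvF] using h
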